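-- pv_equiv track=rewrite | github.com/lukedds/AoC-2021 | Day2/day2.py | follow_instructions_pt1
-- ===== SOURCE A (Python) =====
-- def follow_instructions_pt1(instructions):
--     horizontal = 0
--     vertical = 0
--
--     for i in instructions:
--         if i[0] == "up":
--             vertical -= i[1]
--         if i[0] == "down":
--             vertical += i[1]
--         if i[0] == "forward":
--             horizontal += i[1]
--
--     return horizontal, vertical
-- ===== SOURCE B (Python) =====
-- def follow_instructions_pt1(instructions):
--     horizontal = sum(v for d, v in instructions if d == "forward")
--     vertical = (sum(v for d, v in instructions if d == "down")
--                 - sum(v for d, v in instructions if d == "up"))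
--     return horizontal, vertical
-- ===== Notes on version B (the rewrite author's own statement) =====
-- stated objective: simpler
-- what changed: Replaces the single accumulating loop with three independent filtered sums (forward, down, up) combined arithmetically.
import Mathlib
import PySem

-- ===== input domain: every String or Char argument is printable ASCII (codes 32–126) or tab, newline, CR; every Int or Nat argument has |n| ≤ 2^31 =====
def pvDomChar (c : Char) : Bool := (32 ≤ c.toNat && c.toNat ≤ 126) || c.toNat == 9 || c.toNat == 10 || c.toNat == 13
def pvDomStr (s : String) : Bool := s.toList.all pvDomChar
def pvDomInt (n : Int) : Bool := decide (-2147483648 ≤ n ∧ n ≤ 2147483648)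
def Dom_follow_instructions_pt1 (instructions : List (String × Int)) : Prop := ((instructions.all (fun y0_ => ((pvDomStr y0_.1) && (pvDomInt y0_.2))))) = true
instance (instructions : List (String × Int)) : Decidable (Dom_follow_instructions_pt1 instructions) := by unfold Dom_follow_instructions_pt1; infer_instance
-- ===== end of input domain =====

-- B replaces A's single accumulating loop by three filtered sums combined arithmetically (objective: simpler).

-- ===== PORT A =====
def follow_instructions_pt1 (instructions : List (String × Int)) : Int × Int :=
  instructions.foldl (fun st i =>
    let vertical := if i.1 == "up" then st.2 - i.2 else st.2
    let vertical := if i.1 == "down" then vertical + i.2 else vertical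
    let horizontal := if i.1 == "forward" then st.1 + i.2 else st.1
    (horizontal, vertical)) (0, 0)

-- ===== PORT B =====
def follow_instructions_pt1_alt (instructions : List (String × Int)) : Int × Int :=
  (((instructions.filter (fun i => i.1 == "forward")).map Prod.snd).sum,
   ((instructions.filter (fun i => i.1 == "down")).map Prod.snd).sum
     - ((instructions.filter (fun i => i.1 == "up")).map Prod.snd).sum)

-- ===== PRECONDITION & SPEC =====
def Spec_follow_instructions_pt1 (instructions : List (String × Int)) (out : Int × Int) : Prop := out = follow_instructions_pt1_alt instructions
instance (instructions : List (String × Int)) (out : Int × Int) : Decidable (Spec_follow_instructions_pt1 instructions out) := by unfold Spec_follow_instructions_pt1; infer_instance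

-- ===== CLAIM (what is proved, stated in full; the proofs are below) =====
def Claim_equal_follow_instructions_pt1 : Prop := ∀ (instructions : List (String × Int)), Dom_follow_instructions_pt1 instructions → Spec_follow_instructions_pt1 instructions (follow_instructions_pt1 instructions)

-- ===== LEMMAS AND PROOFS =====
theorem follow_foldl_inv (l : List (String × Int)) (h v : Int) :
    l.foldl (fun st i =>
      let vertical := if i.1 == "up" then st.2 - i.2 else st.2
      let vertical := if i.1 == "down" then vertical + i.2 else vertical
      let horizontal := if i.1 == "forward" then st.1 + i.2 else st.1
      (horizontal, vertical)) (h, v)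
    = (h + ((l.filter (fun i => i.1 == "forward")).map Prod.snd).sum,
       v + ((l.filter (fun i => i.1 == "down")).map Prod.snd).sum
         - ((l.filter (fun i => i.1 == "up")).map Prod.snd).sum) := by
  induction l generalizing h v with
  | nil => simp
  | cons x xs ih =>
    simp only [List.foldl_cons, List.filter_cons]
    rw [ih]
    by_cases hu : x.1 == "up" <;> by_cases hd : x.1 == "down" <;>
      by_cases hf : x.1 == "forward" <;>
      (simp_all; try constructor) <;> ring

-- ===== VERDICT (by name: the statement is the Claim_ definition above) =====
theorem follow_instructions_pt1_spec : Claim_equal_follow_instructions_pt1 := by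
  intro instructions _
  unfold Spec_follow_instructions_pt1 follow_instructions_pt1 follow_instructions_pt1_alt
  rw [follow_foldl_inv]
  simp
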